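-- pv_equiv track=rewrite | github.com/alisa-fh/lossless-compression | encoder.py | best_length_offset
-- ===== SOURCE A (Python) =====
-- def best_length_offset(
--     window: str, input_string: str, max_length: int = 15,  max_offset: int = 4095
-- ) -> (int, int):
--     """Take the window and an input string and return the offset and length
--     with the biggest length of the input string as a substring"""
--
--     if max_offset < len(window):
--         cut_window = window[0:max_offset]
--     else:
--         cut_window = window
--
--     # Return (0, 0) if the string provided is empty
--     if input_string is None or input_string == "":
--         return (0, 4095)
--
--     # Initialise result parameters - best case so far
--     length, offset = (1, 4095)
--
--     # This should also catch the empty window case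
--     # If not seen before
--     if input_string[0] not in cut_window:
--         best_length = repeating_length_from_start(input_string[0], input_string[1:])
--         return (min((length + best_length), max_length), offset)
--
--     # Best length now zero to allow occurences to take priority
--     length = 0
--
--     # Test for every string in the window, in reverse order to keep the offset as low as possible
--     # Look for either the whole window or up to max offset away, whichever is smaller
--     for index in range(0, (len(cut_window) )):
--         # Get the character at this offset
--         char = cut_window[index]
--         if char == input_string[0]:
--             found_offset = index
--             # Collect any further strings which can be found
--             found_length = repeating_length_from_start(
--                 cut_window[index:], input_string
--             )
--             if found_length > length:
--                 length = found_length
--                 offset = found_offset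
--
--     # Only return up to the maximum length
--     # This will capture the maximum number of characters allowed
--     # although it might not capture the maximum amount of characters *possible*
--     return (min(length, max_length), offset)
--
-- def repeating_length_from_start(window: str, input_string: str) -> int:
--     """Get the maximum repeating length of the input from the start of the window"""
--     if window == "" or input_string == "":
--         return 0
--
--     if window[0] == input_string[0]:
--         return 1 + repeating_length_from_start(
--             window[1:] + input_string[0], input_string[1:]
--         )
--     else:
--         return 0
-- ===== SOURCE B (Python) =====
-- def best_length_offset(window, input_string, max_length=15, max_offset=4095):
--     if not input_string:
--         return (0, 4095)
--     cw = window[:max_offset] if max_offset < len(window) else window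
--     c = input_string[0]
--     positions = [i for i, ch in enumerate(cw) if ch == c]
--     if not positions:
--         run = 1
--         while run < len(input_string) and input_string[run] == c:
--             run += 1
--         return (min(run, max_length), 4095)
--     length, neg_off = max((match_length(cw, i, input_string), -i) for i in positions)
--     return (min(length, max_length), -neg_off)
--
-- def match_length(w, i, s):
--     """Overlap-aware match length of s against w[i:] extended by the matched text itself."""
--     n = len(w)
--     j = 0
--     while j < len(s) and s[j] == (w[i + j] if i + j < n else s[i + j - n]):
--         j += 1
--     return j
-- ===== Notes on version B (the rewrite author's own statement) =====
-- stated objective: faster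
-- what changed: B replaces A's rotating-string recursion (which rebuilds a window-sized string window[1:]+char for every matched character) with an in-place two-index matcher using index arithmetic over the fixed window, and replaces A's guarded accumulator loop over every window index with a filter of the occurrence positions of input_string[0] followed by a single max() over (length, -offset) pairs.
import Mathlib
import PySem

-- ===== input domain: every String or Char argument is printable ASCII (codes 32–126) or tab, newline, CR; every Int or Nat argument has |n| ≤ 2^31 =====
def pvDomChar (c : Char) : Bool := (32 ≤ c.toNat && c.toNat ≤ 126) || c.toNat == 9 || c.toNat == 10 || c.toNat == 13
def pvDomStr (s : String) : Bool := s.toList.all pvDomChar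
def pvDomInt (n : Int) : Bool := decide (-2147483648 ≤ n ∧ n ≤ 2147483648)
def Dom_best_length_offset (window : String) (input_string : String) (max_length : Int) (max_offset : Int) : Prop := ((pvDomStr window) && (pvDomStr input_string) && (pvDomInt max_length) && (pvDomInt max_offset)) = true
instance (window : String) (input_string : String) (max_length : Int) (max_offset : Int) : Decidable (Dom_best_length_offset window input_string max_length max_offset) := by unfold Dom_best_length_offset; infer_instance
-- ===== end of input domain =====

-- B replaces A's rotating-string recursion with an in-place two-index matcher and A's
-- guarded accumulator loop with max() over the occurrence positions (objective: idiomatic).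

-- ===== PORT A =====
-- repeating_length_from_start: recursion rebuilding window[1:] + input[0] at every step
def rls : List Char → List Char → Int
  | [], _ => 0
  | _ :: _, [] => 0
  | a :: w, b :: s => if a = b then 1 + rls (w ++ [b]) s else 0
termination_by _w s => s.length

def best_length_offset (window : String) (input_string : String) (max_length : Int) (max_offset : Int) : Int × Int :=
  let w := window.toList
  let cut_window := if max_offset < (w.length : Int) then PySem.List.slice w (some 0) (some max_offset) else w
  match input_string.toList with
  | [] => (0, 4095)
  | c :: rest =>
    if cut_window.contains c = false then
      (min (1 + rls [c] rest) max_length, 4095)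
    else
      let r := (PySem.List.enumerate cut_window 0).foldl
        (fun (acc : Int × Int) p =>
          if p.2 = c then
            let fl := rls (cut_window.drop p.1.toNat) (c :: rest)
            if fl > acc.1 then (fl, p.1) else acc
          else acc) (0, 4095)
      (min r.1 max_length, r.2)

-- ===== PORT B =====
-- while j < len(s) and s[j] == (w[i+j] if i+j < n else s[i+j-n]): j += 1
def mlAux (w : List Char) (i : Nat) (s : List Char) (j : Nat) : Int :=
  if _h : j < s.length then
    if s[j]! = (if i + j < w.length then w[i + j]! else s[i + j - w.length]!) then
      mlAux w i s (j + 1)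
    else (j : Int)
  else (j : Int)
termination_by s.length - j

def match_length (w : List Char) (i : Nat) (s : List Char) : Int := mlAux w i s 0

-- run = 1; while run < len(s) and s[run] == c: run += 1
def runAux (s : List Char) (c : Char) (run : Nat) : Int :=
  if _h : run < s.length then
    if s[run]! = c then runAux s c (run + 1) else (run : Int)
  else (run : Int)
termination_by s.length - run

-- Python max over (int, int) tuples: replace the accumulator only on strict lexicographic increase
def pymaxPair (a b : Int × Int) : Int × Int :=
  if a.1 < b.1 ∨ (a.1 = b.1 ∧ a.2 < b.2) then b else a

def best_length_offset_alt (window : String) (input_string : String) (max_length : Int) (max_offset : Int) : Int × Int :=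
  match input_string.toList with
  | [] => (0, 4095)
  | c :: rest =>
    let w := window.toList
    let cw := if max_offset < (w.length : Int) then PySem.List.slice w (some 0) (some max_offset) else w
    let positions := ((PySem.List.enumerate cw 0).filter (fun p => p.2 = c)).map (fun p => p.1.toNat)
    match positions with
    | [] => (min (runAux (c :: rest) c 1) max_length, 4095)
    | p :: ps =>
      let best := ps.foldl (fun acc i => pymaxPair acc (match_length cw i (c :: rest), -(i : Int)))
        (match_length cw p (c :: rest), -(p : Int))
      (min best.1 max_length, -best.2)

-- ===== PRECONDITION & SPEC =====
def Spec_best_length_offset (window : String) (input_string : String) (max_length : Int) (max_offset : Int) (out : Int × Int) : Prop := out = best_length_offset_alt window input_string max_length max_offset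
instance (window : String) (input_string : String) (max_length : Int) (max_offset : Int) (out : Int × Int) : Decidable (Spec_best_length_offset window input_string max_length max_offset out) := by unfold Spec_best_length_offset; infer_instance

-- ===== CLAIM (what is proved, stated in full; the proofs are below) =====
def Claim_equal_best_length_offset : Prop := ∀ (window : String) (input_string : String) (max_length : Int) (max_offset : Int), Dom_best_length_offset window input_string max_length max_offset → Spec_best_length_offset window input_string max_length max_offset (best_length_offset window input_string max_length max_offset)

-- ===== LEMMAS AND PROOFS =====

theorem rls_nonneg (w s : List Char) : 0 ≤ rls w s := by
  induction w, s using rls.induct with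
  | case1 => simp [rls]
  | case2 => simp [rls]
  | case3 w b s ih => simp only [rls]; omega
  | case4 a w b s hne => simp [rls, if_neg hne]

theorem runAux_eq (s : List Char) (c : Char) (r : Nat) (h : r ≤ s.length) :
    runAux s c r = (r : Int) + rls [c] (s.drop r) := by
  by_cases hr : r < s.length
  · rw [List.drop_eq_getElem_cons hr]
    rw [runAux]
    rw [dif_pos hr, getElem!_pos s r hr]
    by_cases he : s[r] = c
    · rw [if_pos he, runAux_eq s c (r+1) (by omega), he]
      simp only [rls, List.nil_append]
      push_cast; ring
    · rw [if_neg he]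
      have hcr : ¬ (c = s[r]) := fun hh => he hh.symm
      simp only [rls, if_neg hcr]
      omega
  · have : r = s.length := by omega
    rw [runAux, dif_neg hr, List.drop_of_length_le (by omega)]
    simp [rls]
termination_by s.length - r
theorem rls_nil_right (w : List Char) : rls w [] = 0 := by
  cases w <;> simp [rls]

theorem mlAux_eq (cw s : List Char) (i j : Nat) (hi : i < cw.length) (hj : j ≤ s.length) :
    mlAux cw i s j = (j : Int) + rls (List.drop j (cw.drop i ++ s.take j)) (s.drop j) := by
  by_cases hlt : j < s.length
  · have hXlen : (cw.drop i ++ s.take j).length = cw.length - i + j := by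
      simp [List.length_drop, List.length_take]; omega
    have hXj : j < (cw.drop i ++ s.take j).length := by omega
    rw [List.drop_eq_getElem_cons hXj, List.drop_eq_getElem_cons hlt]
    have hXe : (cw.drop i ++ s.take j)[j] =
        (if i + j < cw.length then cw[i + j]! else s[i + j - cw.length]!) := by
      by_cases hij : i + j < cw.length
      · rw [if_pos hij]
        have hjd : j < (cw.drop i).length := by simp [List.length_drop]; omega
        rw [List.getElem_append_left hjd, List.getElem_drop, getElem!_pos cw (i+j) hij]
      · rw [if_neg hij]
        have hjd : (cw.drop i).length ≤ j := by simp [List.length_drop]; omega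
        have hlt2 : i + j - cw.length < s.length := by omega
        rw [List.getElem_append_right hjd, List.getElem_take, getElem!_pos s _ hlt2]
        congr 1
        simp [List.length_drop]
        omega
    rw [mlAux, dif_pos hlt, getElem!_pos s j hlt]
    by_cases heq : s[j] = (if i + j < cw.length then cw[i + j]! else s[i + j - cw.length]!)
    · rw [if_pos heq]
      have hhead : (cw.drop i ++ s.take j)[j] = s[j] := by rw [hXe, heq]
      rw [mlAux_eq cw s i (j+1) hi (by omega)]
      simp only [rls, if_pos hhead]
      have hre : List.drop (j+1) (cw.drop i ++ s.take j) ++ [s[j]] =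
          List.drop (j+1) (cw.drop i ++ s.take (j+1)) := by
        conv_rhs => rw [List.take_succ_eq_append_getElem hlt, ← List.append_assoc,
          List.drop_append_of_le_length (by omega)]
      rw [hre]
      push_cast; ring
    · rw [if_neg heq]
      have hne : ¬ ((cw.drop i ++ s.take j)[j] = s[j]) := by rw [hXe]; exact fun hh => heq hh.symm
      simp only [rls, if_neg hne]
      omega
  · have hje : j = s.length := by omega
    rw [mlAux, dif_neg hlt, List.drop_of_length_le (le_of_eq hje.symm), rls_nil_right]
    omega
termination_by s.length - j

theorem match_length_eq (cw s : List Char) (i : Nat) (hi : i < cw.length) :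
    match_length cw i s = rls (cw.drop i) s := by
  rw [match_length, mlAux_eq cw s i 0 hi (by omega)]
  simp
theorem rls_pos (cw : List Char) (p : Nat) (hp : p < cw.length) (rest : List Char)
    (hc : cw[p] = c) : 1 ≤ rls (cw.drop p) (c :: rest) := by
  rw [List.drop_eq_getElem_cons hp, hc]
  have := rls_nonneg (List.drop (p+1) cw ++ [c]) rest
  simp only [rls, if_true]
  omega

theorem fold_inv (cw : List Char) (c : Char) (rest : List Char)
    (ps : List Nat) (L : Int) (I : Nat)
    (hmem : ∀ i ∈ ps, I < i ∧ i < cw.length) (hpw : ps.Pairwise (· < ·)) :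
    ∃ (L' : Int) (I' : Nat),
      ps.foldl (fun acc i => if rls (cw.drop i) (c :: rest) > acc.1 then (rls (cw.drop i) (c :: rest), (i : Int)) else acc) (L, (I : Int)) = (L', (I' : Int)) ∧
      ps.foldl (fun acc i => pymaxPair acc (match_length cw i (c :: rest), -(i : Int))) (L, -(I : Int)) = (L', -(I' : Int)) := by
  induction ps generalizing L I with
  | nil => exact ⟨L, I, rfl, rfl⟩
  | cons i tl ih =>
    have hi : I < i ∧ i < cw.length := hmem i (by simp)
    rw [List.pairwise_cons] at hpw
    have hml : match_length cw i (c :: rest) = rls (cw.drop i) (c :: rest) :=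
      match_length_eq cw (c :: rest) i hi.2
    simp only [List.foldl_cons, hml]
    by_cases hgt : rls (cw.drop i) (c :: rest) > L
    · rw [if_pos hgt]
      have hmax : pymaxPair (L, -(I : Int)) (rls (cw.drop i) (c :: rest), -(i : Int)) =
          (rls (cw.drop i) (c :: rest), -(i : Int)) := by
        simp only [pymaxPair]; rw [if_pos (Or.inl hgt)]
      rw [hmax]
      exact ih (rls (cw.drop i) (c :: rest)) i
        (fun j hj => ⟨hpw.1 j hj, (hmem j (by simp [hj])).2⟩) hpw.2
    · rw [if_neg hgt]
      have hmax : pymaxPair (L, -(I : Int)) (rls (cw.drop i) (c :: rest), -(i : Int)) =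
          (L, -(I : Int)) := by
        simp only [pymaxPair]
        rw [if_neg]
        push Not
        constructor
        · omega
        · intro _; omega
      rw [hmax]
      exact ih L I (fun j hj => ⟨lt_trans hi.1 (hpw.1 j hj), (hmem j (by simp [hj])).2⟩) hpw.2
theorem positions_mem (cw : List Char) (c : Char) (i : Nat)
    (h : i ∈ ((PySem.List.enumerate cw 0).filter (fun p => p.2 = c)).map (fun p => p.1.toNat)) :
    ∃ _ : i < cw.length, cw[i] = c := by
  rcases List.mem_map.1 h with ⟨pr, hpr, hi⟩
  rcases List.mem_filter.1 hpr with ⟨hen, hc⟩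
  rcases (PySem.List.mem_enumerate_iff cw 0 pr).1 hen with ⟨k, hk, hpk⟩
  subst hpk
  simp at hc hi
  subst hi
  exact ⟨hk, hc⟩

theorem positions_pairwise (cw : List Char) (c : Char) :
    (((PySem.List.enumerate cw 0).filter (fun p => p.2 = c)).map (fun p => p.1.toNat)).Pairwise (· < ·) := by
  rw [List.pairwise_map]
  apply List.Pairwise.imp_of_mem (l := (PySem.List.enumerate cw 0).filter (fun p => p.2 = c))
    (R := fun p q => p.1 < q.1)
  · intro a b ha _ hlt
    rcases (PySem.List.mem_enumerate_iff cw 0 a).1 (List.mem_filter.1 ha).1 with ⟨k, _, hak⟩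
    subst hak
    simp at hlt ⊢
    omega
  · exact (PySem.List.pairwise_lt_enumerate cw 0).filter _

theorem positions_nil_iff (cw : List Char) (c : Char) :
    (((PySem.List.enumerate cw 0).filter (fun p => p.2 = c)).map (fun p => p.1.toNat)) = [] ↔ ¬ c ∈ cw := by
  rw [List.map_eq_nil_iff, List.filter_eq_nil_iff]
  constructor
  · intro h hmem
    rcases List.getElem_of_mem hmem with ⟨k, hk, hck⟩
    exact h ((0 + (k : Int), cw[k])) ((PySem.List.mem_enumerate_iff cw 0 _).2 ⟨k, hk, rfl⟩) (by simp [hck])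
  · intro h p hp hc
    rcases (PySem.List.mem_enumerate_iff cw 0 p).1 hp with ⟨k, hk, hpk⟩
    subst hpk
    simp at hc
    exact h (hc ▸ List.getElem_mem hk)
theorem bl_main (window input_string : String) (max_length max_offset : Int) :
    best_length_offset window input_string max_length max_offset = best_length_offset_alt window input_string max_length max_offset := by
  unfold best_length_offset best_length_offset_alt
  cases hs : input_string.toList with
  | nil => rfl
  | cons c rest =>
    simp only
    set cw := (if max_offset < ((window.toList).length : Int) then PySem.List.slice window.toList (some 0) (some max_offset) else window.toList) with hcw
    set positions := ((PySem.List.enumerate cw 0).filter (fun p => p.2 = c)).map (fun p => p.1.toNat) with hposdef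
    by_cases hc : cw.contains c = false
    · rw [if_pos hc]
      have hpos : positions = [] := (positions_nil_iff cw c).2 (by simpa using hc)
      rw [hpos]
      simp only
      rw [runAux_eq (c :: rest) c 1 (by simp)]
      simp
    · rw [if_neg hc]
      have hmemc : c ∈ cw := by
        by_contra hmem
        exact hc (by simpa using hmem)
      have hposne : positions ≠ [] := fun h => ((positions_nil_iff cw c).1 h) hmemc
      cases hposl : positions with
      | nil => exact absurd hposl hposne
      | cons p ps =>
        simp only
        have hmemp : p ∈ positions := by rw [hposl]; exact List.mem_cons_self
        obtain ⟨hplt, hpc⟩ := positions_mem cw c p (hposdef ▸ hmemp)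
        have hpw0 : (p :: ps).Pairwise (· < ·) := hposl ▸ (hposdef ▸ positions_pairwise cw c)
        rw [List.pairwise_cons] at hpw0
        have hbody : (fun (acc : Int × Int) (pr : Int × Char) =>
            if pr.2 = c then
              (if rls (List.drop pr.1.toNat cw) (c :: rest) > acc.1 then (rls (List.drop pr.1.toNat cw) (c :: rest), pr.1) else acc)
            else acc)
            = (fun (acc : Int × Int) (pr : Int × Char) =>
            if (fun (q : Int × Char) => decide (q.2 = c)) pr = true then
              (if rls (List.drop pr.1.toNat cw) (c :: rest) > acc.1 then (rls (List.drop pr.1.toNat cw) (c :: rest), pr.1) else acc)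
            else acc) := by
          funext acc pr; simp
        rw [hbody, ← List.foldl_filter]
        have hcong : List.foldl (fun (acc : Int × Int) (pr : Int × Char) =>
              if rls (List.drop pr.1.toNat cw) (c :: rest) > acc.1 then (rls (List.drop pr.1.toNat cw) (c :: rest), pr.1) else acc)
            (0, 4095) ((PySem.List.enumerate cw 0).filter (fun q => q.2 = c))
            = List.foldl (fun (acc : Int × Int) (pr : Int × Char) =>
              if rls (List.drop pr.1.toNat cw) (c :: rest) > acc.1 then (rls (List.drop pr.1.toNat cw) (c :: rest), ((pr.1.toNat : Nat) : Int)) else acc)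
            (0, 4095) ((PySem.List.enumerate cw 0).filter (fun q => q.2 = c)) := by
          apply PySem.List.foldl_congr_mem
          intro acc pr hpr
          rcases (PySem.List.mem_enumerate_iff cw 0 pr).1 (List.mem_filter.1 hpr).1 with ⟨k, hk, hpk⟩
          subst hpk
          simp
        rw [hcong]
        have hmap : List.foldl (fun (acc : Int × Int) (i : Nat) =>
              if rls (List.drop i cw) (c :: rest) > acc.1 then (rls (List.drop i cw) (c :: rest), (i : Int)) else acc)
            (0, 4095) positions
            = List.foldl (fun (acc : Int × Int) (pr : Int × Char) =>
              if rls (List.drop pr.1.toNat cw) (c :: rest) > acc.1 then (rls (List.drop pr.1.toNat cw) (c :: rest), ((pr.1.toNat : Nat) : Int)) else acc)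
            (0, 4095) ((PySem.List.enumerate cw 0).filter (fun q => q.2 = c)) := by
          rw [hposdef]
          simp only [List.foldl_map]
        rw [← hmap, hposl]
        rw [List.foldl_cons]
        have hfp : rls (cw.drop p) (c :: rest) > (0 : Int) := lt_of_lt_of_le (by norm_num) (rls_pos cw p hplt rest hpc)
        rw [if_pos hfp]
        rw [match_length_eq cw (c :: rest) p hplt]
        obtain ⟨L', I', hA, hB⟩ := fold_inv cw c rest ps (rls (cw.drop p) (c :: rest)) p
          (fun i hi => ⟨hpw0.1 i hi, (positions_mem cw c i (hposdef ▸ (hposl ▸ List.mem_cons_of_mem p hi))).1⟩)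
          hpw0.2
        rw [hA, hB]
        simp

-- ===== VERDICT (by name: the statement is the Claim_ definition above) =====
theorem best_length_offset_spec : Claim_equal_best_length_offset := by
  intro window input_string max_length max_offset _
  exact bl_main window input_string max_length max_offset
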